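-- pv_equiv track=rewrite | github.com/DorokhovaTatiana/graph-python | graph.py | is_Graphic_Sequence
-- ===== SOURCE A (Python) =====
-- def is_Graphic_Sequence(sequence, lengthSequence):
--     b = c = s = 0
--     w = lengthSequence
--     i = 0
--     while i < lengthSequence:
--         b+=sequence[i]
--         c = c + w - 1
--         while w - 1 > i and sequence[w-1] <= i:
--             s+=sequence[w-1]
--             c-= i + 1
--             w-= 1
--         if b > c + s:
--              return False
--         if w-1 == i:
--             return True
--         i+=1
--     return False
-- ===== SOURCE B (Python) =====
-- def is_Graphic_Sequence(sequence, lengthSequence):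
--     pref = 0
--     for i in range(lengthSequence):
--         k = i + 1
--         pref += sequence[i]
--         # right-hand side: k*(k-1), plus each element of the maximal suffix of
--         # values <= i contributing itself, and every other element past i
--         # contributing k; scanned backwards, no state carried between rounds.
--         rhs = k * (k - 1)
--         in_small_suffix = True
--         for j in range(lengthSequence - 1, i, -1):
--             if in_small_suffix and sequence[j] <= i:
--                 rhs += sequence[j]
--             else:
--                 in_small_suffix = False
--                 rhs += k
--         if pref > rhs:
--             return False
--         # all remaining elements form the small suffix: test complete
--         if in_small_suffix:
--             return True
--     return False
-- ===== Notes on version B (the rewrite author's own statement) =====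
-- stated objective: alternative
-- what changed: A threads four mutating accumulators (prefix sum b, counter c, popped-tail sum s, back pointer w) across iterations with a stateful inner pop loop; B keeps only the running prefix sum and recomputes the right-hand side for each k from scratch as the closed form k*(k-1) plus one stateless backward scan of the tail.
-- outside the precondition, e.g. on is_Graphic_Sequence([1], 2): A raises IndexError, B raises IndexError
import Mathlib
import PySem

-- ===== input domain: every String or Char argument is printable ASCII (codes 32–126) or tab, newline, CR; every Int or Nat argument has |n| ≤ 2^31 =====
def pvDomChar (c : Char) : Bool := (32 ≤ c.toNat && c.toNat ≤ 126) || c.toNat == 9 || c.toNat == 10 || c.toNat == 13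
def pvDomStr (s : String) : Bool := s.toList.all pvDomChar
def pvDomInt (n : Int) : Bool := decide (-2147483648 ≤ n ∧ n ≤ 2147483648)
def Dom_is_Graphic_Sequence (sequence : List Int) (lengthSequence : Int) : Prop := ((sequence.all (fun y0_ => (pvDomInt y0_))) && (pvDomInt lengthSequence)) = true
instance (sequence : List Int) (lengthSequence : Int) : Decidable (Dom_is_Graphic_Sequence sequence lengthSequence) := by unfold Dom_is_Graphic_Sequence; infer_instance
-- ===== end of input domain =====

-- B replaces A's four mutating accumulators (b,c,s,w carried across iterations) by a
-- stateless per-k recomputation: closed form k*(k-1) plus one backward scan; objective: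
-- alternative decomposition (O(n^2) instead of A's O(n), but plainer).

-- ===== PORT A =====
-- inner 'while w - 1 > i and sequence[w-1] <= i' loop; returns the new (w, c, s)
def pvInnerA (seq : List Int) (i w c s : Int) : Int × Int × Int :=
  if h : w - 1 > i ∧ PySem.List.pyGetD seq (w - 1) 0 ≤ i then
    pvInnerA seq i (w - 1) (c - (i + 1)) (s + PySem.List.pyGetD seq (w - 1) 0)
  else (w, c, s)
termination_by (w - i).toNat
decreasing_by omega

-- outer 'while i < lengthSequence' loop
def pvLoopA (seq : List Int) (n i b c s w : Int) : Bool :=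
  if h : i < n then
    let b' := b + PySem.List.pyGetD seq i 0
    let c' := c + w - 1
    let r := pvInnerA seq i w c' s
    if b' > r.2.1 + r.2.2 then false
    else if r.1 - 1 = i then true
    else pvLoopA seq n (i + 1) b' r.2.1 r.2.2 r.1
  else false
termination_by (n - i).toNat
decreasing_by omega

def is_Graphic_Sequence (sequence : List Int) (lengthSequence : Int) : Bool :=
  pvLoopA sequence lengthSequence 0 0 0 0 lengthSequence

-- ===== PORT B =====
-- 'for j in range(lengthSequence-1, i, -1)' backward scan; returns (rhs, in_small_suffix)
def pvScanB (seq : List Int) (i j rhs : Int) (small : Bool) : Int × Bool :=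
  if h : j > i then
    if small ∧ PySem.List.pyGetD seq j 0 ≤ i then
      pvScanB seq i (j - 1) (rhs + PySem.List.pyGetD seq j 0) small
    else
      pvScanB seq i (j - 1) (rhs + (i + 1)) false
  else (rhs, small)
termination_by (j - i).toNat
decreasing_by all_goals omega

-- 'for i in range(lengthSequence)' loop carrying only the prefix sum
def pvLoopB (seq : List Int) (n i pref : Int) : Bool :=
  if h : i < n then
    let pref' := pref + PySem.List.pyGetD seq i 0
    let r := pvScanB seq i (n - 1) ((i + 1) * (i + 1 - 1)) true
    if pref' > r.1 then false
    else if r.2 then true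
    else pvLoopB seq n (i + 1) pref'
  else false
termination_by (n - i).toNat
decreasing_by omega

def is_Graphic_Sequence_alt (sequence : List Int) (lengthSequence : Int) : Bool :=
  pvLoopB sequence lengthSequence 0 0

-- ===== PRECONDITION & SPEC =====
-- Pre_ excludes exactly the inputs where Python A raises IndexError: lengthSequence > len(sequence).
def Pre_is_Graphic_Sequence (sequence : List Int) (lengthSequence : Int) : Prop :=
  lengthSequence ≤ (sequence.length : Int)
instance (sequence : List Int) (lengthSequence : Int) : Decidable (Pre_is_Graphic_Sequence sequence lengthSequence) := by unfold Pre_is_Graphic_Sequence; infer_instance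
def pvWitness_is_Graphic_Sequence : List Int × Int := ([2, 1, 1], 3)

def Spec_is_Graphic_Sequence (sequence : List Int) (lengthSequence : Int) (out : Bool) : Prop := out = is_Graphic_Sequence_alt sequence lengthSequence
instance (sequence : List Int) (lengthSequence : Int) (out : Bool) : Decidable (Spec_is_Graphic_Sequence sequence lengthSequence out) := by unfold Spec_is_Graphic_Sequence; infer_instance

-- ===== CLAIM (what is proved, stated in full; the proofs are below) =====
def Claim_equal_is_Graphic_Sequence : Prop := ∀ (sequence : List Int) (lengthSequence : Int), Dom_is_Graphic_Sequence sequence lengthSequence → Pre_is_Graphic_Sequence sequence lengthSequence → Spec_is_Graphic_Sequence sequence lengthSequence (is_Graphic_Sequence sequence lengthSequence)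

-- ===== LEMMAS AND PROOFS =====

-- sum of pyGetD over indices [w, n)
def pvSuff (seq : List Int) (w n : Int) : Int :=
  if h : w < n then PySem.List.pyGetD seq w 0 + pvSuff seq (w + 1) n else 0
termination_by (n - w).toNat
decreasing_by omega

theorem pvSuff_self (seq : List Int) (n : Int) : pvSuff seq n n = 0 := by
  rw [pvSuff]; simp

theorem pvSuff_split (seq : List Int) : ∀ fuel : Nat, ∀ a b c : Int, (b - a).toNat ≤ fuel →
    a ≤ b → b ≤ c → pvSuff seq a c = pvSuff seq a b + pvSuff seq b c := by
  intro fuel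
  induction fuel with
  | zero => intro a b c hf hab hbc
            have : a = b := by omega
            subst this; rw [pvSuff_self]; ring
  | succ k ih => intro a b c hf hab hbc
                 by_cases h : a = b
                 · subst h; rw [pvSuff_self]; ring
                 · have hab' : a < b := by omega
                   rw [pvSuff, dif_pos (by omega : a < c), ih (a+1) b c (by omega) (by omega) hbc]
                   conv_rhs => rw [pvSuff, dif_pos hab']
                   ring

theorem pvSuff_single (seq : List Int) (m : Int) :
    pvSuff seq m (m + 1) = PySem.List.pyGetD seq m 0 := by
  rw [pvSuff, dif_pos (by omega), pvSuff_self]; ring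

theorem pvScanB_false (seq : List Int) (i : Int) : ∀ fuel : Nat, ∀ m rhs : Int,
    (m - i).toNat ≤ fuel → i ≤ m →
    pvScanB seq i m rhs false = (rhs + (i + 1) * (m - i), false) := by
  intro fuel
  induction fuel with
  | zero => intro m rhs hf him
            have : m = i := by omega
            subst this; rw [pvScanB, dif_neg (by omega)]; simp
  | succ k ih => intro m rhs hf him
                 by_cases h : m = i
                 · subst h; rw [pvScanB, dif_neg (by omega)]; simp
                 · rw [pvScanB, dif_pos (by omega : m > i)]
                   simp only [Bool.false_eq_true, false_and, if_false]
                   rw [ih (m-1) (rhs + (i+1)) (by omega) (by omega)]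
                   have : rhs + (i + 1) + (i + 1) * (m - 1 - i) = rhs + (i + 1) * (m - i) := by ring
                   rw [this]

-- key: one outer iteration's inner pop-loop of A matches B's backward scan
theorem pvKey (seq : List Int) (i : Int) (hi : 0 ≤ i) : ∀ fuel : Nat, ∀ w c s rhs : Int,
    (w - i).toNat ≤ fuel → i + 1 ≤ w →
    (i + 1 ≤ (pvInnerA seq i w c s).1 ∧ (pvInnerA seq i w c s).1 ≤ w) ∧
    (pvInnerA seq i w c s).2.1 = c - (i + 1) * (w - (pvInnerA seq i w c s).1) ∧
    (pvInnerA seq i w c s).2.2 = s + pvSuff seq (pvInnerA seq i w c s).1 w ∧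
    (∀ j : Int, (pvInnerA seq i w c s).1 ≤ j → j < w → PySem.List.pyGetD seq j 0 ≤ i) ∧
    pvScanB seq i (w - 1) rhs true =
      (rhs + pvSuff seq (pvInnerA seq i w c s).1 w +
        (if (pvInnerA seq i w c s).1 - 1 = i then 0 else (i + 1) * ((pvInnerA seq i w c s).1 - 1 - i)),
       decide ((pvInnerA seq i w c s).1 - 1 = i)) := by
  intro fuel
  induction fuel with
  | zero => intro w c s rhs hf hw; omega
  | succ k ih =>
    intro w c s rhs hf hw
    by_cases hpop : w - 1 > i ∧ PySem.List.pyGetD seq (w - 1) 0 ≤ i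
    · have hA : pvInnerA seq i w c s =
          pvInnerA seq i (w - 1) (c - (i + 1)) (s + PySem.List.pyGetD seq (w - 1) 0) := by
        rw [pvInnerA, dif_pos hpop]
      obtain ⟨⟨h1, h2⟩, hc, hs, hall, hscan⟩ :=
        ih (w - 1) (c - (i + 1)) (s + PySem.List.pyGetD seq (w - 1) 0)
          (rhs + PySem.List.pyGetD seq (w - 1) 0) (by omega) (by omega)
      have hsplit : pvSuff seq (pvInnerA seq i w c s).1 w =
          pvSuff seq (pvInnerA seq i w c s).1 (w - 1) + PySem.List.pyGetD seq (w - 1) 0 := by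
        rw [hA, pvSuff_split seq (w - 1 - (pvInnerA seq i (w - 1) (c - (i + 1))
              (s + PySem.List.pyGetD seq (w - 1) 0)).1).toNat _ (w - 1) w le_rfl h2 (by omega)]
        have : w = w - 1 + 1 := by ring
        rw [this, show w - 1 + 1 - 1 = w - 1 by ring, pvSuff_single]
      refine ⟨⟨by rw [hA]; exact le_trans h1 (by omega) |>.trans (le_refl _) |>.trans_eq rfl |>.trans (le_refl _), by rw [hA]; omega⟩, ?_, ?_, ?_, ?_⟩
      · rw [hA, hc]
        have : c - (i + 1) - (i + 1) * (w - 1 - (pvInnerA seq i (w - 1) (c - (i + 1))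
            (s + PySem.List.pyGetD seq (w - 1) 0)).1) = c - (i + 1) * (w - (pvInnerA seq i (w - 1)
            (c - (i + 1)) (s + PySem.List.pyGetD seq (w - 1) 0)).1) := by ring
        rw [this, ← hA]
      · rw [hsplit, hA, hs]; ring
      · intro j hj hj'
        rw [hA] at hj
        by_cases hje : j = w - 1
        · subst hje; exact hpop.2
        · exact hall j hj (by omega)
      · rw [pvScanB, dif_pos (by omega : w - 1 > i)]
        simp only [true_and]
        rw [if_pos hpop.2, hscan, hsplit, hA]
        have : rhs + PySem.List.pyGetD seq (w - 1) 0 + pvSuff seq (pvInnerA seq i (w - 1)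
            (c - (i + 1)) (s + PySem.List.pyGetD seq (w - 1) 0)).1 (w - 1) =
            rhs + (pvSuff seq (pvInnerA seq i (w - 1) (c - (i + 1))
            (s + PySem.List.pyGetD seq (w - 1) 0)).1 (w - 1) + PySem.List.pyGetD seq (w - 1) 0) := by
          ring
        rw [this]
    · have hA : pvInnerA seq i w c s = (w, c, s) := by
        rw [pvInnerA, dif_neg hpop]
      rw [hA]
      refine ⟨⟨hw, le_rfl⟩, by simp [pvSuff_self], by simp [pvSuff_self], fun j hj hj' => by omega, ?_⟩
      by_cases hwi : w - 1 = i
      · rw [pvScanB, dif_neg (by omega), pvSuff_self, if_pos hwi]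
        simp [hwi]
      · have hd : ¬ PySem.List.pyGetD seq (w - 1) 0 ≤ i := fun hle => hpop ⟨by omega, hle⟩
        rw [pvScanB, dif_pos (by omega : w - 1 > i)]
        simp only [true_and]
        rw [if_neg hd, pvScanB_false seq i (w - 1 - 1 - i).toNat (w - 1 - 1) (rhs + (i + 1))
              le_rfl (by omega), pvSuff_self, if_neg hwi]
        have : rhs + (i + 1) + (i + 1) * (w - 1 - 1 - i) = rhs + 0 + (i + 1) * (w - 1 - i) := by ring
        rw [this]
        simp [hwi]

theorem pvScan_extend (seq : List Int) (i w : Int) : ∀ fuel : Nat, ∀ m rhs : Int,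
    (m + 1 - w).toNat ≤ fuel → i < w → w ≤ m + 1 →
    (∀ j : Int, w ≤ j → j ≤ m → PySem.List.pyGetD seq j 0 ≤ i) →
    pvScanB seq i m rhs true = pvScanB seq i (w - 1) (rhs + pvSuff seq w (m + 1)) true := by
  intro fuel
  induction fuel with
  | zero => intro m rhs hf hiw hwm hp
            have : w = m + 1 := by omega
            subst this; rw [pvSuff_self]; norm_num
  | succ k ih => intro m rhs hf hiw hwm hp
                 by_cases h : w = m + 1
                 · subst h; rw [pvSuff_self]; norm_num
                 · have hwm' : w ≤ m := by omega
                   rw [pvScanB, dif_pos (by omega : m > i)]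
                   simp only [true_and]
                   rw [if_pos (hp m hwm' le_rfl)]
                   rw [ih (m-1) _ (by omega) hiw (by omega) (fun j hj hj' => hp j hj (by omega))]
                   have hs : pvSuff seq w (m + 1) = pvSuff seq w m + PySem.List.pyGetD seq m 0 := by
                     rw [pvSuff_split seq (m - w).toNat w m (m+1) le_rfl hwm' (by omega), pvSuff_single]
                   have harg : rhs + PySem.List.pyGetD seq m 0 + pvSuff seq w (m - 1 + 1) = rhs + pvSuff seq w (m + 1) := by
                     rw [show m - 1 + 1 = m by ring, hs]; ring
                   rw [harg]

theorem pvLoopA_eq (seq : List Int) (n : Int) :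
    ∀ fuel : Nat, ∀ i b c s w : Int, (n - i).toNat ≤ fuel →
    0 ≤ i → i + 1 ≤ w → w ≤ n →
    (∀ j : Int, w ≤ j → j < n → PySem.List.pyGetD seq j 0 ≤ i - 1) →
    c + s = i * (i - 1) + i * (w - i) + pvSuff seq w n →
    pvLoopA seq n i b c s w = pvLoopB seq n i b := by
  intro fuel
  induction fuel with
  | zero => intro i b c s w hf hi hw hwn hp hcs
            rw [pvLoopA, dif_neg (by omega), pvLoopB, dif_neg (by omega)]
  | succ k ih =>
    intro i b c s w hf hi hw hwn hp hcs
    by_cases hin : i < n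
    · rw [pvLoopA, pvLoopB]
      simp only [dif_pos hin]
      obtain ⟨⟨h1, h2⟩, hc, hs, hall, hscan⟩ :=
        pvKey seq i hi (w - i).toNat w (c + w - 1) s
          ((i + 1) * (i + 1 - 1) + pvSuff seq w n) le_rfl hw
      have hext : pvScanB seq i (n - 1) ((i + 1) * (i + 1 - 1)) true =
          pvScanB seq i (w - 1) ((i + 1) * (i + 1 - 1) + pvSuff seq w n) true := by
        rw [pvScan_extend seq i w (n - 1 + 1 - w).toNat (n - 1) _ le_rfl (by omega) (by omega)
              (fun j hj hj' => le_trans (hp j hj (by omega)) (by omega)),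
            show n - 1 + 1 = n by ring]
      rw [hext, hscan]
      set W := (pvInnerA seq i w (c + w - 1) s).1 with hWdef
      by_cases hwi : W - 1 = i
      · have hkey : (pvInnerA seq i w (c + w - 1) s).2.1 + (pvInnerA seq i w (c + w - 1) s).2.2 =
            (i + 1) * (i + 1 - 1) + pvSuff seq w n + pvSuff seq W w +
            (if W - 1 = i then 0 else (i + 1) * (W - 1 - i)) := by
          rw [hc, hs, if_pos hwi]
          linear_combination hcs + (i + 1) * hwi
        rw [hkey]
        by_cases hgt : b + PySem.List.pyGetD seq i 0 > (i + 1) * (i + 1 - 1) + pvSuff seq w n +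
            pvSuff seq W w + (if W - 1 = i then 0 else (i + 1) * (W - 1 - i))
        · rw [if_pos hgt, if_pos hgt]
        · rw [if_neg hgt, if_neg hgt, if_pos hwi]
          simp [hwi]
      · have hkey : (pvInnerA seq i w (c + w - 1) s).2.1 + (pvInnerA seq i w (c + w - 1) s).2.2 =
            (i + 1) * (i + 1 - 1) + pvSuff seq w n + pvSuff seq W w +
            (if W - 1 = i then 0 else (i + 1) * (W - 1 - i)) := by
          rw [hc, hs, if_neg hwi]
          linear_combination hcs
        rw [hkey]
        by_cases hgt : b + PySem.List.pyGetD seq i 0 > (i + 1) * (i + 1 - 1) + pvSuff seq w n +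
            pvSuff seq W w + (if W - 1 = i then 0 else (i + 1) * (W - 1 - i))
        · rw [if_pos hgt, if_pos hgt]
        · rw [if_neg hgt, if_neg hgt, if_neg hwi]
          simp only [hwi, decide_false, Bool.false_eq_true, if_false]
          have hWn : W ≤ n := le_trans h2 hwn
          have hsplitn : pvSuff seq W n = pvSuff seq W w + pvSuff seq w n := by
            rw [pvSuff_split seq (w - W).toNat W w n le_rfl h2 hwn]
          exact ih (i + 1) (b + PySem.List.pyGetD seq i 0)
            (pvInnerA seq i w (c + w - 1) s).2.1 (pvInnerA seq i w (c + w - 1) s).2.2 W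
            (by omega) (by omega) (by omega) hWn
            (fun j hj hj' => by
              by_cases hjw : j < w
              · have := hall j hj hjw; omega
              · have := hp j (by omega) hj'; omega)
            (by rw [hc, hs]
                linear_combination hcs - hsplitn)
    · rw [pvLoopA, dif_neg hin, pvLoopB, dif_neg hin]

theorem is_Graphic_Sequence_spec : Claim_equal_is_Graphic_Sequence := by
  intro seq n _ _
  unfold Spec_is_Graphic_Sequence is_Graphic_Sequence is_Graphic_Sequence_alt
  by_cases h : 0 < n
  · exact pvLoopA_eq seq n (n - 0).toNat 0 0 0 0 n le_rfl le_rfl (by omega) le_rfl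
      (fun j hj hj' => absurd (lt_of_le_of_lt hj hj') (lt_irrefl _))
      (by simp [pvSuff_self])
  · rw [pvLoopA, pvLoopB]; simp [h]
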